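-- pv_equiv track=rewrite | github.com/Marcello2020-dev/whatsapp-export-tools | _local/scripts/wet_audit_timestamp_drift.py | scrub_component
-- ===== SOURCE A (Python) =====
-- def scrub_component(comp: str) -> str:
--     out = []
--     last_underscore = False
--     for ch in comp:
--         if ch.isalpha():
--             if not last_underscore:
--                 out.append("_")
--                 last_underscore = True
--         else:
--             out.append(ch)
--             last_underscore = False
--     trimmed = "".join(out).strip("_")
--     return trimmed if trimmed else "_"
-- ===== SOURCE B (Python) =====
-- def scrub_component(comp: str) -> str:
--     parts = []
--     i, n = 0, len(comp)
--     while i < n: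
--         key = comp[i].isalpha()
--         j = i + 1
--         while j < n and comp[j].isalpha() == key:
--             j += 1
--         parts.append("_" if key else comp[i:j])
--         i = j
--     trimmed = "".join(parts).strip("_")
--     return trimmed if trimmed else "_"
-- ===== Notes on version B (the rewrite author's own statement) =====
-- stated objective: alternative
-- what changed: B scans the string as maximal runs of equal isalpha-key with a two-pointer loop (emitting '_' per alpha run and the whole slice per non-alpha run), replacing A's per-character state machine with a last_underscore flag.
import Mathlib
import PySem

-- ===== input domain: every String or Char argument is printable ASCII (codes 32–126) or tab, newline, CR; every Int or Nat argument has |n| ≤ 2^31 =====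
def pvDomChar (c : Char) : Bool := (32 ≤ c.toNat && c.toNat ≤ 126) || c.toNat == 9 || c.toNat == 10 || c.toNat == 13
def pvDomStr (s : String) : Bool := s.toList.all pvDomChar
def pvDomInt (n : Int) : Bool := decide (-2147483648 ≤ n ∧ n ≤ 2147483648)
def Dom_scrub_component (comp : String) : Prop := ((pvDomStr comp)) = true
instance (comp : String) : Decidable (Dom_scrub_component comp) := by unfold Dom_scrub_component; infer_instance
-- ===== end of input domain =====

-- B replaces A's per-character state machine (last_underscore flag) with a two-pointer
-- scan over maximal runs of equal isalpha-key; same cost, alternative structure.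

-- ===== PORT A =====
-- per-character fold over (out, last_underscore); out kept as List Char
-- ("".join of single-char appends); .strip("_") = stripChars with ['_'].
def pvStepA (acc : List Char × Bool) (ch : Char) : List Char × Bool :=
  if PySem.Chars.isalpha ch then
    if !acc.2 then (acc.1 ++ ['_'], true) else acc
  else
    (acc.1 ++ [ch], false)

def scrub_component (comp : String) : String :=
  let st := comp.toList.foldl pvStepA ([], false)
  let trimmed := PySem.Chars.stripChars st.1 ['_']
  if trimmed = [] then "_" else String.ofList trimmed

-- ===== PORT B =====
-- Source B's inner while loop advancing j over the run = takeWhile/dropWhile on the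
-- suffix; each outer-loop step emits one part and jumps to the run's end.
def pvRuns : List Char → List (List Char)
  | [] => []
  | c :: cs =>
    let key := PySem.Chars.isalpha c
    let run := cs.takeWhile (fun d => PySem.Chars.isalpha d == key)
    let rest := cs.dropWhile (fun d => PySem.Chars.isalpha d == key)
    (if key then ['_'] else c :: run) :: pvRuns rest
termination_by l => l.length
decreasing_by simpa using Nat.lt_succ_of_le (List.length_dropWhile_le _ _)

def scrub_component_alt (comp : String) : String :=
  let trimmed := PySem.Chars.stripChars (pvRuns comp.toList).flatten ['_']
  if trimmed = [] then "_" else String.ofList trimmed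

-- ===== PRECONDITION & SPEC =====
def Spec_scrub_component (comp : String) (out : String) : Prop := out = scrub_component_alt comp
instance (comp : String) (out : String) : Decidable (Spec_scrub_component comp out) := by unfold Spec_scrub_component; infer_instance

-- ===== CLAIM (what is proved, stated in full; the proofs are below) =====
def Claim_equal_scrub_component : Prop := ∀ (comp : String), Dom_scrub_component comp → Spec_scrub_component comp (scrub_component comp)

-- ===== LEMMAS AND PROOFS =====

-- reference recursion: the character list both cores produce before stripping
def pvF : List Char → Bool → List Char
  | [], _ => []
  | c :: cs, last =>
    if PySem.Chars.isalpha c then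
      if last then pvF cs true else '_' :: pvF cs true
    else c :: pvF cs false

theorem pvA_foldl (cs : List Char) (out : List Char) (last : Bool) :
    (cs.foldl pvStepA (out, last)).1 = out ++ pvF cs last := by
  induction cs generalizing out last with
  | nil => simp [pvF]
  | cons c cs ih =>
    rw [List.foldl_cons]
    by_cases h : PySem.Chars.isalpha c = true
    · cases last with
      | true =>
        have hs : pvStepA (out, true) c = (out, true) := by simp [pvStepA, h]
        rw [hs, ih, pvF]; simp [h]
      | false =>
        have hs : pvStepA (out, false) c = (out ++ ['_'], true) := by simp [pvStepA, h]
        rw [hs, ih, pvF]; simp [h]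
    · have hs : pvStepA (out, last) c = (out ++ [c], false) := by simp [pvStepA, h]
      rw [hs, ih, pvF]; simp [h]

theorem pvF_skip (g rest : List Char) (h : ∀ c ∈ g, PySem.Chars.isalpha c = true) :
    pvF (g ++ rest) true = pvF rest true := by
  induction g with
  | nil => simp
  | cons c g ih =>
    have hc := h c (by simp)
    simpa [pvF, hc] using ih (fun d hd => h d (by simp [hd]))

theorem pvF_nonalpha (g rest : List Char) (h : ∀ c ∈ g, PySem.Chars.isalpha c = false) :
    pvF (g ++ rest) false = g ++ pvF rest false := by
  induction g with
  | nil => simp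
  | cons c g ih =>
    have hc := h c (by simp)
    simpa [pvF, hc] using ih (fun d hd => h d (by simp [hd]))

theorem pvF_true_head (cs : List Char)
    (h : ∀ x, cs.head? = some x → PySem.Chars.isalpha x = false) :
    pvF cs true = pvF cs false := by
  cases cs with
  | nil => rfl
  | cons c cs => simp [pvF, h c rfl]

theorem pv_dropWhile_head {p : Char → Bool} (l : List Char) (x : Char) (t : List Char)
    (h : l.dropWhile p = x :: t) : p x = false := by
  induction l with
  | nil => simp at h
  | cons c l ih =>
    by_cases hc : p c = true
    · exact ih (by simpa [List.dropWhile, hc] using h)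
    · simp [List.dropWhile, hc] at h
      simpa [h.1] using hc

theorem pvB_core (cs : List Char) : (pvRuns cs).flatten = pvF cs false := by
  induction cs using pvRuns.induct with
  | case1 => simp [pvRuns, pvF]
  | case2 c cs key rest0 ih =>
    have hkeydef : key = PySem.Chars.isalpha c := rfl
    set run := cs.takeWhile (fun d => PySem.Chars.isalpha d == key) with hrundef
    have hrest0 : rest0 = cs.dropWhile (fun d => PySem.Chars.isalpha d == key) := rfl
    set rest := cs.dropWhile (fun d => PySem.Chars.isalpha d == key) with hrestdef
    rw [hrest0] at ih
    have hcs : run ++ rest = cs := List.takeWhile_append_dropWhile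
    have hstep : pvRuns (c :: cs) = (if key then ['_'] else c :: run) :: pvRuns rest := by
      rw [pvRuns]
    rw [hstep, List.flatten_cons]
    by_cases hk : PySem.Chars.isalpha c = true
    · have hkey : key = true := by rw [hkeydef, hk]
      have hskip : pvF cs true = pvF rest true := by
        rw [← hcs, pvF_skip run rest (fun d hd => by
          have := List.mem_takeWhile_imp (hrundef ▸ hd)
          simpa [hkey] using this)]
      have hhead : pvF rest true = pvF rest false := by
        apply pvF_true_head
        intro x hx
        cases hrest : rest with
        | nil => simp [hrest] at hx
        | cons y t =>
          rw [hrest] at hx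
          simp at hx
          subst hx
          have := pv_dropWhile_head (p := fun d => PySem.Chars.isalpha d == key) cs y t
            (by rw [← hrestdef]; exact hrest)
          simpa [hkey] using this
      simp [hkey, pvF, hk, ih, hskip, hhead]
    · have hkey : key = false := by rw [hkeydef]; simpa using hk
      have hrun : ∀ d ∈ run, PySem.Chars.isalpha d = false := fun d hd => by
        have := List.mem_takeWhile_imp (hrundef ▸ hd)
        simpa [hkey] using this
      have hsplit : pvF cs false = run ++ pvF rest false := by
        rw [← hcs, pvF_nonalpha run rest hrun]
      simp [hkey, pvF, hk, ih, hsplit]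

-- ===== VERDICT (by name: the statement is the Claim_ definition above) =====
theorem scrub_component_spec : Claim_equal_scrub_component := by
  intro comp _
  unfold Spec_scrub_component scrub_component scrub_component_alt
  have h := pvA_foldl comp.toList [] false
  simp only [List.nil_append] at h
  simp [pvB_core, h]
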